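-- pv_equiv track=rewrite | github.com/ram-motukuri/competitive-coding | jio2.py | jio1
-- ===== SOURCE A (Python) =====
-- def jio1(l1):
--     u=[]
--     v=[]
--     k=sorted(l1)[::-1]
--     a=l1.index(k[0])
--     u.append(k[0])
--     v.append(a)
--     l1[a]=0
--     for i in range(1,len(k)):
--         if(k[i]>0):
--             b=l1.index(k[i])
--             if((b-1 not in v) and (b+1 not in v)):
--                 v.append(b)
--                 u.append(k[i])
--                 l1[b]=0
--             else:
--                 l1[b]=0
--     return(sum(u),v)
-- ===== SOURCE B (Python) =====
-- # Selection strategy instead of A's sort-then-scan: repeatedly extract the maximum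
-- # remaining index (ties: smallest index) from a shrinking index list, pick it unless
-- # a neighbour index is already in the picked set, and stop as soon as the maximum
-- # remaining value is non-positive.  No sorting, no .index lookups over values, and
-- # no mutation of l1 (A zeroes entries of l1 in place; the equivalence is about the
-- # return value only).
-- def jio1(l1):
--     rem = list(range(len(l1)))
--     picked = set()
--     total = 0
--     v = []
--     first = True
--     while rem:
--         bi = rem[0]
--         bv = l1[bi]
--         for i in rem:
--             w = l1[i]
--             if w > bv or (w == bv and i < bi):
--                 bi = i
--                 bv = w
--         rem.remove(bi)
--         if first:
--             first = False
--         elif bv <= 0: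
--             break
--         elif bi - 1 in picked or bi + 1 in picked:
--             continue
--         picked.add(bi)
--         total += bv
--         v.append(bi)
--     return (total, v)
-- ===== Notes on version B (the rewrite author's own statement) =====
-- stated objective: alternative
-- what changed: A sorts the values descending and repeatedly calls list.index on a copy it mutates (zeroing processed entries), testing adjacency by scanning the picked-index list; B never sorts and never looks values up: it repeatedly selects the maximum remaining index (ties: smallest index) from a shrinking index list, checks adjacency in a set, and stops as soon as the maximum remaining value is non-positive.
import Mathlib
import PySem

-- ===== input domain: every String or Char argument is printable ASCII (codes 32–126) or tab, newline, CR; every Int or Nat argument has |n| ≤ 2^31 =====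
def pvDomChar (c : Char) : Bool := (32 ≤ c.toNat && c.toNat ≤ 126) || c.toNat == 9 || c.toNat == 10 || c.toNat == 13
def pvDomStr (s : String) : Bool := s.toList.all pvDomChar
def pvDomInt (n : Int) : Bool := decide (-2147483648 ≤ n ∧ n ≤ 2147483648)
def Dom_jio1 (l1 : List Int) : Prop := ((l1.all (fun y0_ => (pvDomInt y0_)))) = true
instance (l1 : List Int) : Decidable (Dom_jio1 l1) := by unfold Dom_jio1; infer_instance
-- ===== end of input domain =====

-- B replaces A's sort + repeated list.index over a mutated value list by repeated selection
-- of the maximum remaining index from a shrinking index list, with early termination once the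
-- maximum remaining value is non-positive (no sort, no value lookups); A mutates its argument
-- in place (zeroes entries), B does not — the equivalence proved here is about the return value.

-- ===== PORT A =====
def jio1 (l1 : List Int) : Int × List Int :=
  let k := (PySem.List.slice? (PySem.List.sorted l1 (fun x => x)) none none (-1)).getD []
  match PySem.List.pyGet? k 0 with
  | none => (0, [])  -- first element of an empty sorted copy: Python raises IndexError (excluded by Pre_jio1)
  | some k0 =>
    match PySem.List.index? l1 k0 with
    | none => (0, [])  -- unreachable: k0 is an element of l1
    | some a =>
      let st :=
        (PySem.List.pyRange 1 (k.length : Int)).foldl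
          (fun (st : List Int × List Int × List Int) i =>
            let ki := PySem.List.pyGetD k i 0
            if ki > 0 then
              match PySem.List.index? st.2.2 ki with
              | none => st  -- unreachable: ki is still present in the mutated list
              | some b =>
                if ((b : Int) - 1) ∉ st.2.1 ∧ ((b : Int) + 1) ∉ st.2.1 then
                  (st.1 ++ [ki], st.2.1 ++ [(b : Int)], st.2.2.set b 0)
                else
                  (st.1, st.2.1, st.2.2.set b 0)
            else st)
          ([k0], [(a : Int)], l1.set a 0)
      (st.1.sum, st.2.1)

-- ===== PORT B =====
-- Source B's while loop: fuel = the length of the index list, which shrinks by one per iteration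
def pvSelLoop (l1 : List Int) : Nat → List Int → Bool → PySem.Set Int × Int × List Int → Int × List Int
  | 0, _, _, st => (st.2.1, st.2.2)
  | _ + 1, [], _, st => (st.2.1, st.2.2)
  | fuel + 1, r0 :: rs, first, st =>
      let p := (r0 :: rs).foldl (fun (p : Int × Int) i =>
        let w := PySem.List.pyGetD l1 i 0
        if w > p.2 ∨ (w = p.2 ∧ i < p.1) then (i, w) else p) (r0, PySem.List.pyGetD l1 r0 0)
      let rem' := (PySem.List.remove? (r0 :: rs) p.1).getD []  -- .getD unreachable: p.1 is a member
      if first then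
        pvSelLoop l1 fuel rem' false (PySem.Set.add st.1 p.1, st.2.1 + p.2, st.2.2 ++ [p.1])
      else if p.2 ≤ 0 then (st.2.1, st.2.2)
      else if PySem.Set.contains st.1 (p.1 - 1) || PySem.Set.contains st.1 (p.1 + 1) then
        pvSelLoop l1 fuel rem' false st
      else
        pvSelLoop l1 fuel rem' false (PySem.Set.add st.1 p.1, st.2.1 + p.2, st.2.2 ++ [p.1])

def jio1_alt (l1 : List Int) : Int × List Int :=
  pvSelLoop l1 l1.length (PySem.List.pyRange 0 (l1.length : Int)) true (PySem.Set.empty, 0, [])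

-- ===== PRECONDITION & SPEC =====
-- Python A indexes the first element of the sorted copy, so it raises IndexError exactly on the empty list.
def Pre_jio1 (l1 : List Int) : Prop := l1 ≠ []
instance (l1 : List Int) : Decidable (Pre_jio1 l1) := by unfold Pre_jio1; infer_instance
def pvWitness_jio1 : List Int := [3, 1, 2]


def Spec_jio1 (l1 : List Int) (out : Int × List Int) : Prop := out = jio1_alt l1
instance (l1 : List Int) (out : Int × List Int) : Decidable (Spec_jio1 l1 out) := by unfold Spec_jio1; infer_instance

-- ===== CLAIM (what is proved, stated in full; the proofs are below) =====
def Claim_equal_jio1 : Prop := ∀ (l1 : List Int), Dom_jio1 l1 → Pre_jio1 l1 → Spec_jio1 l1 (jio1 l1)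

-- ===== LEMMAS AND PROOFS =====

-- value of l1 at an Int index, as both ports read it
def pvG (l1 : List Int) (i : Int) : Int := PySem.List.pyGetD l1 i 0

-- the strict "descending value, ties by ascending index" order in which both programs
-- process the indices
def pvLx (l1 : List Int) (a b : Int) : Prop :=
  pvG l1 b < pvG l1 a ∨ (pvG l1 a = pvG l1 b ∧ a < b)

-- A's loop body, with k[i] already read
def pvStepA (st : List Int × List Int × List Int) (ki : Int) : List Int × List Int × List Int :=
  if ki > 0 then
    match PySem.List.index? st.2.2 ki with
    | none => st
    | some b =>
      if ((b : Int) - 1) ∉ st.2.1 ∧ ((b : Int) + 1) ∉ st.2.1 then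
        (st.1 ++ [ki], st.2.1 ++ [(b : Int)], st.2.2.set b 0)
      else
        (st.1, st.2.1, st.2.2.set b 0)
  else st

-- an abstract step combining B's pick/skip treatment of one index
def pvStepB (l1 : List Int) (st : PySem.Set Int × Int × List Int) (i : Int) :
    PySem.Set Int × Int × List Int :=
  if PySem.List.pyGetD l1 i 0 > 0 ∧
      PySem.Set.contains st.1 (i - 1) = false ∧
      PySem.Set.contains st.1 (i + 1) = false then
    (PySem.Set.add st.1 i, st.2.1 + PySem.List.pyGetD l1 i 0, st.2.2 ++ [i])
  else st

theorem pvLx_trans (l1 : List Int) (a b c : Int) (h1 : pvLx l1 a b) (h2 : pvLx l1 b c) :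
    pvLx l1 a c := by
  unfold pvLx at *; omega

theorem pvLx_asymm (l1 : List Int) (a b : Int) (h1 : pvLx l1 a b) (h2 : pvLx l1 b a) : False := by
  unfold pvLx at *; omega

theorem pvLx_total (l1 : List Int) (a b : Int) : a = b ∨ pvLx l1 a b ∨ pvLx l1 b a := by
  unfold pvLx; omega

-- Source B's inner for-loop computes the lex-least element under pvLx
theorem pvArgmin_spec (l1 : List Int) :
    ∀ (rs : List Int) (r0 : Int),
      (rs.foldl (fun b i =>
        if PySem.List.pyGetD l1 i 0 > PySem.List.pyGetD l1 b 0 ∨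
           (PySem.List.pyGetD l1 i 0 = PySem.List.pyGetD l1 b 0 ∧ i < b) then i else b) r0) ∈ r0 :: rs ∧
      ∀ y ∈ r0 :: rs, y = (rs.foldl (fun b i =>
        if PySem.List.pyGetD l1 i 0 > PySem.List.pyGetD l1 b 0 ∨
           (PySem.List.pyGetD l1 i 0 = PySem.List.pyGetD l1 b 0 ∧ i < b) then i else b) r0) ∨
        pvLx l1 (rs.foldl (fun b i =>
        if PySem.List.pyGetD l1 i 0 > PySem.List.pyGetD l1 b 0 ∨
           (PySem.List.pyGetD l1 i 0 = PySem.List.pyGetD l1 b 0 ∧ i < b) then i else b) r0) y := by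
  intro rs
  induction rs with
  | nil =>
    intro r0
    constructor
    · exact List.mem_cons_self
    · intro y hy
      rcases List.mem_cons.1 hy with rfl | hy
      · exact Or.inl rfl
      · cases hy
  | cons i is ih =>
    intro r0
    rw [List.foldl_cons]
    by_cases h : PySem.List.pyGetD l1 i 0 > PySem.List.pyGetD l1 r0 0 ∨
        (PySem.List.pyGetD l1 i 0 = PySem.List.pyGetD l1 r0 0 ∧ i < r0)
    · rw [if_pos h]
      have hir0 : pvLx l1 i r0 := h
      obtain ⟨hm, hall⟩ := ih i
      set m := is.foldl (fun b i =>
        if PySem.List.pyGetD l1 i 0 > PySem.List.pyGetD l1 b 0 ∨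
           (PySem.List.pyGetD l1 i 0 = PySem.List.pyGetD l1 b 0 ∧ i < b) then i else b) i with hmdef
      refine ⟨?_, ?_⟩
      · rcases List.mem_cons.1 hm with h' | h'
        · exact h' ▸ List.mem_cons_of_mem _ List.mem_cons_self
        · exact List.mem_cons_of_mem _ (List.mem_cons_of_mem _ h')
      · intro y hy
        rcases List.mem_cons.1 hy with h0 | hy'
        · -- y = r0
          rw [h0]
          rcases hall i List.mem_cons_self with h' | h'
          · exact Or.inr (h' ▸ hir0)
          · exact Or.inr (pvLx_trans l1 m i r0 h' hir0)
        · exact hall y hy'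
    · rw [if_neg h]
      have hr0i : i = r0 ∨ pvLx l1 r0 i := by
        rcases pvLx_total l1 i r0 with h' | h' | h'
        · exact Or.inl h'
        · exact absurd h' h
        · exact Or.inr h'
      obtain ⟨hm, hall⟩ := ih r0
      set m := is.foldl (fun b i =>
        if PySem.List.pyGetD l1 i 0 > PySem.List.pyGetD l1 b 0 ∨
           (PySem.List.pyGetD l1 i 0 = PySem.List.pyGetD l1 b 0 ∧ i < b) then i else b) r0 with hmdef
      refine ⟨?_, ?_⟩
      · rcases List.mem_cons.1 hm with h' | h'
        · exact h' ▸ List.mem_cons_self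
        · exact List.mem_cons_of_mem _ (List.mem_cons_of_mem _ h')
      · intro y hy
        rcases List.mem_cons.1 hy with h0 | hy'
        · rw [h0]; exact hall r0 List.mem_cons_self
        rcases List.mem_cons.1 hy' with h1 | hy''
        · -- y = i
          rw [h1]
          rcases hr0i with h2 | hlx
          · rw [h2]; exact hall r0 List.mem_cons_self
          · rcases hall r0 List.mem_cons_self with h' | h'
            · exact Or.inr (h' ▸ hlx)
            · exact Or.inr (pvLx_trans l1 m r0 i h' hlx)
        · exact hall y (List.mem_cons_of_mem _ hy'')

-- the selected element is the head of the pvLx-sorted arrangement of the remaining indices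
theorem pvArgmin_eq_head (l1 : List Int) (r0 : Int) (rs : List Int) (b : Int) (t : List Int)
    (hperm : (r0 :: rs).Perm (b :: t)) (hpair : (b :: t).Pairwise (pvLx l1)) :
    (rs.foldl (fun b i =>
      if PySem.List.pyGetD l1 i 0 > PySem.List.pyGetD l1 b 0 ∨
         (PySem.List.pyGetD l1 i 0 = PySem.List.pyGetD l1 b 0 ∧ i < b) then i else b) r0) = b := by
  obtain ⟨hm, hall⟩ := pvArgmin_spec l1 rs r0
  set m := rs.foldl (fun b i =>
    if PySem.List.pyGetD l1 i 0 > PySem.List.pyGetD l1 b 0 ∨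
       (PySem.List.pyGetD l1 i 0 = PySem.List.pyGetD l1 b 0 ∧ i < b) then i else b) r0 with hmdef
  have hb : b ∈ r0 :: rs := hperm.mem_iff.2 List.mem_cons_self
  rcases hall b hb with h | h
  · exact h.symm
  · -- pvLx m b; but b is pvLx-least, contradiction unless m = b
    have hmmem : m ∈ b :: t := hperm.mem_iff.1 hm
    rcases List.mem_cons.1 hmmem with h' | h'
    · exact h'
    · exact absurd ((List.pairwise_cons.1 hpair).1 m h') (fun hh => pvLx_asymm l1 m b h hh)

-- the pair-carrying fold of the port tracks (index, value of that index)
theorem pvPairFold (l1 : List Int) :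
    ∀ (rs : List Int) (b : Int),
      rs.foldl (fun (p : Int × Int) i =>
        let w := PySem.List.pyGetD l1 i 0
        if w > p.2 ∨ (w = p.2 ∧ i < p.1) then (i, w) else p) (b, PySem.List.pyGetD l1 b 0)
      = ((rs.foldl (fun c i =>
          if PySem.List.pyGetD l1 i 0 > PySem.List.pyGetD l1 c 0 ∨
             (PySem.List.pyGetD l1 i 0 = PySem.List.pyGetD l1 c 0 ∧ i < c) then i else c) b),
         PySem.List.pyGetD l1 (rs.foldl (fun c i =>
          if PySem.List.pyGetD l1 i 0 > PySem.List.pyGetD l1 c 0 ∨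
             (PySem.List.pyGetD l1 i 0 = PySem.List.pyGetD l1 c 0 ∧ i < c) then i else c) b) 0) := by
  intro rs
  induction rs with
  | nil => intro b; rfl
  | cons i is ih =>
    intro b
    rw [List.foldl_cons, List.foldl_cons]
    show List.foldl (fun (p : Int × Int) i =>
        let w := PySem.List.pyGetD l1 i 0
        if w > p.2 ∨ (w = p.2 ∧ i < p.1) then (i, w) else p)
        (if PySem.List.pyGetD l1 i 0 > PySem.List.pyGetD l1 b 0 ∨
            (PySem.List.pyGetD l1 i 0 = PySem.List.pyGetD l1 b 0 ∧ i < b)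
         then (i, PySem.List.pyGetD l1 i 0) else (b, PySem.List.pyGetD l1 b 0)) is
      = _
    by_cases h : PySem.List.pyGetD l1 i 0 > PySem.List.pyGetD l1 b 0 ∨
        (PySem.List.pyGetD l1 i 0 = PySem.List.pyGetD l1 b 0 ∧ i < b)
    · rw [if_pos h, if_pos h]
      exact ih i
    · rw [if_neg h, if_neg h]
      exact ih b

-- the first scan step (comparing rem[0] with itself) changes nothing
theorem pvPairFold_first (l1 : List Int) (r0 : Int) (rs : List Int) :
    (r0 :: rs).foldl (fun (p : Int × Int) i =>
        let w := PySem.List.pyGetD l1 i 0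
        if w > p.2 ∨ (w = p.2 ∧ i < p.1) then (i, w) else p) (r0, PySem.List.pyGetD l1 r0 0)
      = rs.foldl (fun (p : Int × Int) i =>
        let w := PySem.List.pyGetD l1 i 0
        if w > p.2 ∨ (w = p.2 ∧ i < p.1) then (i, w) else p) (r0, PySem.List.pyGetD l1 r0 0) := by
  rw [List.foldl_cons]
  show rs.foldl (fun (p : Int × Int) i =>
      let w := PySem.List.pyGetD l1 i 0
      if w > p.2 ∨ (w = p.2 ∧ i < p.1) then (i, w) else p)
      (if PySem.List.pyGetD l1 r0 0 > PySem.List.pyGetD l1 r0 0 ∨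
          (PySem.List.pyGetD l1 r0 0 = PySem.List.pyGetD l1 r0 0 ∧ r0 < r0)
       then (r0, PySem.List.pyGetD l1 r0 0) else (r0, PySem.List.pyGetD l1 r0 0))
    = _
  rw [ite_self]

-- removing the selected head from the remaining indices (list.remove finds it: it is a member)
theorem pvRemove_perm (r0 b : Int) (rs t : List Int)
    (hperm : (r0 :: rs).Perm (b :: t)) :
    (PySem.List.remove? (r0 :: rs) b).getD [] = (r0 :: rs).erase b ∧
      ((r0 :: rs).erase b).Perm t := by
  refine ⟨?_, ?_⟩
  · rw [PySem.List.remove?_eq_some_erase _ _ (hperm.mem_iff.2 List.mem_cons_self)]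
    rfl
  · have h := hperm.erase b
    rwa [List.erase_cons_head] at h

-- once the maximum remaining value is non-positive, the abstract fold does nothing
theorem pvFoldB_skip (l1 : List Int) :
    ∀ (xs : List Int) (st : PySem.Set Int × Int × List Int),
      (∀ i ∈ xs, PySem.List.pyGetD l1 i 0 ≤ 0) → xs.foldl (pvStepB l1) st = st := by
  intro xs
  induction xs with
  | nil => intro st _; rfl
  | cons x t ih =>
    intro st h
    rw [List.foldl_cons]
    have hx : pvStepB l1 st x = st := by
      rw [pvStepB, if_neg (fun hh => by
        have := h x List.mem_cons_self
        omega)]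
    rw [hx]
    exact ih st (fun i hi => h i (List.mem_cons_of_mem _ hi))

-- B's while loop (past the first iteration) equals the abstract fold over the sorted order
theorem pvSelLoop_false_eq (l1 : List Int) :
    ∀ (fuel : Nat) (srt rem : List Int) (st : PySem.Set Int × Int × List Int),
      rem.length ≤ fuel → rem.Perm srt → srt.Pairwise (pvLx l1) → srt.Nodup →
      pvSelLoop l1 fuel rem false st
        = ((srt.foldl (pvStepB l1) st).2.1, (srt.foldl (pvStepB l1) st).2.2) := by
  intro fuel
  induction fuel with
  | zero =>
    intro srt rem st hlen hperm _ _
    have hrem : rem = [] := List.eq_nil_of_length_eq_zero (by omega)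
    have hsrt : srt = [] := (hrem ▸ hperm).symm.eq_nil
    subst hrem; subst hsrt; rfl
  | succ fuel ih =>
    intro srt rem st hlen hperm hpair hnd
    cases rem with
    | nil =>
      have hsrt : srt = [] := hperm.symm.eq_nil
      subst hsrt; rfl
    | cons r0 rs =>
      cases srt with
      | nil => exact absurd hperm.eq_nil (by simp)
      | cons b t =>
        have hbi := pvArgmin_eq_head l1 r0 rs b t hperm hpair
        obtain ⟨hremEq, hperm'⟩ := pvRemove_perm r0 b rs t hperm
        have hpair' := (List.pairwise_cons.1 hpair).2
        have hnd' := (List.nodup_cons.1 hnd).2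
        have hlen' : ((r0 :: rs).erase b).length ≤ fuel := by
          have := hperm'.length_eq
          have := hperm.length_eq
          simp only [List.length_cons] at *
          omega
        have hbt : ∀ x ∈ t, pvLx l1 b x := (List.pairwise_cons.1 hpair).1
        have hp : (r0 :: rs).foldl (fun (p : Int × Int) i =>
            let w := PySem.List.pyGetD l1 i 0
            if w > p.2 ∨ (w = p.2 ∧ i < p.1) then (i, w) else p) (r0, PySem.List.pyGetD l1 r0 0)
            = (b, PySem.List.pyGetD l1 b 0) := by
          rw [pvPairFold_first, pvPairFold, hbi]
        show (let p := (r0 :: rs).foldl (fun (p : Int × Int) i =>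
            let w := PySem.List.pyGetD l1 i 0
            if w > p.2 ∨ (w = p.2 ∧ i < p.1) then (i, w) else p) (r0, PySem.List.pyGetD l1 r0 0)
          let rem' := (PySem.List.remove? (r0 :: rs) p.1).getD []
          if (false : Bool) then
            pvSelLoop l1 fuel rem' false (PySem.Set.add st.1 p.1, st.2.1 + p.2, st.2.2 ++ [p.1])
          else if p.2 ≤ 0 then (st.2.1, st.2.2)
          else if PySem.Set.contains st.1 (p.1 - 1) || PySem.Set.contains st.1 (p.1 + 1) then
            pvSelLoop l1 fuel rem' false st
          else
            pvSelLoop l1 fuel rem' false (PySem.Set.add st.1 p.1, st.2.1 + p.2, st.2.2 ++ [p.1]))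
          = (((b :: t).foldl (pvStepB l1) st).2.1, ((b :: t).foldl (pvStepB l1) st).2.2)
        simp only [hp, hremEq, Bool.false_eq_true, if_false]
        rw [List.foldl_cons]
        by_cases hle : PySem.List.pyGetD l1 b 0 ≤ 0
        · rw [if_pos hle]
          have hstb : pvStepB l1 st b = st := by
            rw [pvStepB, if_neg (fun hh => by omega)]
          rw [hstb, pvFoldB_skip l1 t st (fun i hi => by
            rcases hbt i hi with h | h
            · have : pvG l1 i < pvG l1 b := h
              simp only [pvG] at this
              omega
            · have : pvG l1 b = pvG l1 i := h.1
              simp only [pvG] at this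
              omega)]
        · rw [if_neg hle]
          by_cases hadj : PySem.Set.contains st.1 (b - 1) || PySem.Set.contains st.1 (b + 1)
          · rw [if_pos hadj]
            have hstb : pvStepB l1 st b = st := by
              rw [pvStepB, if_neg (fun hh => by
                rcases Bool.or_eq_true_iff.1 hadj with h | h
                · rw [hh.2.1] at h; exact Bool.false_ne_true h
                · rw [hh.2.2] at h; exact Bool.false_ne_true h)]
            rw [hstb]
            exact ih t _ st hlen' hperm' hpair' hnd'
          · rw [if_neg hadj]
            have h1 : PySem.Set.contains st.1 (b - 1) = false := by
              rcases Bool.or_eq_false_iff.1 (Bool.eq_false_iff.2 hadj |>.symm ▸ rfl : (PySem.Set.contains st.1 (b - 1) || PySem.Set.contains st.1 (b + 1)) = false) with ⟨ha, _⟩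
              exact ha
            have h2 : PySem.Set.contains st.1 (b + 1) = false := by
              rcases Bool.or_eq_false_iff.1 (Bool.eq_false_iff.2 hadj |>.symm ▸ rfl : (PySem.Set.contains st.1 (b - 1) || PySem.Set.contains st.1 (b + 1)) = false) with ⟨_, hb2⟩
              exact hb2
            have hstb : pvStepB l1 st b
                = (PySem.Set.add st.1 b, st.2.1 + PySem.List.pyGetD l1 b 0, st.2.2 ++ [b]) := by
              rw [pvStepB, if_pos ⟨by omega, h1, h2⟩]
            rw [hstb]
            exact ih t _ _ hlen' hperm' hpair' hnd'

theorem pvInsertBy_lex {κ : Type} [LinearOrder κ] (key : Int → κ) (x : Int) :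
    ∀ (acc : List Int), acc.Pairwise (fun a b => key a < key b ∨ (key a = key b ∧ a < b)) →
      (∀ y ∈ acc, y < x) →
      (PySem.List.insertBy (fun a b => decide (key a < key b)) x acc).Perm (x :: acc) ∧
      (PySem.List.insertBy (fun a b => decide (key a < key b)) x acc).Pairwise
        (fun a b => key a < key b ∨ (key a = key b ∧ a < b)) := by
  intro acc
  induction acc with
  | nil => exact fun _ _ => ⟨List.Perm.refl _, List.pairwise_singleton _ _⟩
  | cons y ys ih =>
    intro hp hlt
    have he : PySem.List.insertBy (fun a b => decide (key a < key b)) x (y :: ys)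
        = if decide (key x < key y) then x :: y :: ys
          else y :: PySem.List.insertBy (fun a b => decide (key a < key b)) x ys := rfl
    have hpy := List.pairwise_cons.1 hp
    by_cases hxy : key x < key y
    · rw [he, if_pos (by simpa using hxy)]
      refine ⟨List.Perm.refl _, List.pairwise_cons.2 ⟨?_, hp⟩⟩
      intro z hz
      rcases List.mem_cons.1 hz with rfl | hz
      · exact Or.inl hxy
      · rcases hpy.1 z hz with h | h
        · exact Or.inl (lt_trans hxy h)
        · exact Or.inl (lt_of_lt_of_le hxy (le_of_eq h.1))
    · rw [he, if_neg (by simpa using hxy)]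
      obtain ⟨ihp, ihpw⟩ := ih hpy.2 (fun z hz => hlt z (List.mem_cons_of_mem _ hz))
      constructor
      · exact (ihp.cons y).trans (List.Perm.swap x y ys)
      · refine List.pairwise_cons.2 ⟨?_, ihpw⟩
        intro z hz
        rcases List.mem_cons.1 (ihp.mem_iff.1 hz) with rfl | hz'
        · rcases lt_or_eq_of_le (le_of_not_gt hxy) with h | h
          · exact Or.inl h
          · exact Or.inr ⟨h, hlt y List.mem_cons_self⟩
        · exact hpy.1 z hz'

theorem pvFoldlIns_lex {κ : Type} [LinearOrder κ] (key : Int → κ) :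
    ∀ (xs acc : List Int), acc.Pairwise (fun a b => key a < key b ∨ (key a = key b ∧ a < b)) →
      xs.Pairwise (· < ·) → (∀ y ∈ acc, ∀ z ∈ xs, y < z) →
      (xs.foldl (fun acc x => PySem.List.insertBy (fun a b => decide (key a < key b)) x acc) acc).Perm (acc ++ xs) ∧
      (xs.foldl (fun acc x => PySem.List.insertBy (fun a b => decide (key a < key b)) x acc) acc).Pairwise
        (fun a b => key a < key b ∨ (key a = key b ∧ a < b)) := by
  intro xs
  induction xs with
  | nil => exact fun acc h _ _ => ⟨by simp, h⟩
  | cons x t ih =>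
    intro acc hacc hxs hall
    obtain ⟨hperm, hpw⟩ := pvInsertBy_lex key x acc hacc
      (fun y hy => hall y hy x List.mem_cons_self)
    have hxt := List.pairwise_cons.1 hxs
    obtain ⟨ihp, ihpw⟩ := ih _ hpw hxt.2 (fun y hy z hz => by
      rcases List.mem_cons.1 (hperm.mem_iff.1 hy) with rfl | hy'
      · exact hxt.1 z hz
      · exact hall y hy' z (List.mem_cons_of_mem _ hz))
    exact ⟨ihp.trans ((hperm.append_right t).trans List.perm_middle.symm), ihpw⟩

theorem pvSorted_pairwise_lex {κ : Type} [LinearOrder κ] (xs : List Int) (key : Int → κ)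
    (h : xs.Pairwise (· < ·)) :
    (PySem.List.sorted xs key).Pairwise (fun a b => key a < key b ∨ (key a = key b ∧ a < b)) := by
  have hdef : PySem.List.sorted xs key
      = xs.foldl (fun acc x => PySem.List.insertBy (fun a b => decide (key a < key b)) x acc) [] := rfl
  rw [hdef]
  exact (pvFoldlIns_lex key xs [] (by simp) h (by simp)).2

theorem pvIndex?_eq_some_of (xs : List Int) (v : Int) (k : Nat) (hk : k < xs.length)
    (hv : xs[k] = v) (hj : ∀ j, (hjk : j < k) → xs[j]'(by omega) ≠ v) :
    PySem.List.index? xs v = some k := by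
  rw [PySem.List.index?_eq_idxOf?, List.idxOf?_eq_some_iff]
  exact ⟨hk, hv, hj⟩

-- the main loop invariant: A's fold over the remaining values equals the abstract fold over the
-- remaining indices
theorem pvLoopEq (l1 : List Int) (o0 : Int) :
    ∀ (rest done u v cur : List Int) (total : Int),
      ((done ++ rest).Perm (PySem.List.pyRange 0 (l1.length : Int))) →
      ((done ++ rest).Pairwise (pvLx l1)) →
      (∃ d', done = o0 :: d') →
      (total = u.sum) →
      (∀ x ∈ v, x ∈ done) →
      (cur.length = l1.length) →
      (∀ (j : Nat) (hj : j < l1.length),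
        cur.getD j 0 = if ((j : Int) ∈ done ∧ ((j : Int) = o0 ∨ 0 < pvG l1 j)) then 0
                       else l1[j]) →
      (((rest.map (pvG l1)).foldl pvStepA (u, v, cur)).1.sum,
        ((rest.map (pvG l1)).foldl pvStepA (u, v, cur)).2.1)
      = ((rest.foldl (pvStepB l1) (v, total, v)).2.1,
         (rest.foldl (pvStepB l1) (v, total, v)).2.2) := by
  intro rest
  induction rest with
  | nil =>
    intro done u v cur total _ _ _ hsum _ _ _
    simp [hsum]
  | cons r t ih =>
    intro done u v cur total hperm hpair hdone hsum hvdone hlen hcur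
    obtain ⟨d', hd'⟩ := hdone
    have hrmem : r ∈ PySem.List.pyRange 0 (l1.length : Int) :=
      hperm.subset (by simp)
    have hr0 : 0 ≤ r ∧ r < (l1.length : Int) := PySem.List.mem_pyRange_one.1 hrmem
    have hrtn : ((r.toNat : Int)) = r := Int.toNat_of_nonneg hr0.1
    have hrlen : r.toNat < l1.length := by omega
    have hnd : (done ++ r :: t).Nodup :=
      hperm.symm.nodup (PySem.List.nodup_pyRange_one _ _)
    have hrdone : r ∉ done := fun h =>
      (List.nodup_append.1 hnd).2.2 r h r List.mem_cons_self rfl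
    have hro0 : r ≠ o0 := fun h => hrdone (h ▸ hd' ▸ List.mem_cons_self)
    have hgr : pvG l1 r = l1[r.toNat] := by
      simpa [pvG, hrtn] using PySem.List.pyGetD_eq_getElem l1 (i := r) 0 hr0.1 hr0.2
    have hgj : ∀ (j : Nat) (hj : j < l1.length), pvG l1 (j : Int) = l1[j] := by
      intro j hj
      simpa [pvG] using PySem.List.pyGetD_eq_getElem l1 (i := (j : Int)) 0 (by omega) (by omega)
    have hjmem : ∀ (j : Nat) (hj : j < l1.length), ((j : Int) ∈ done ++ r :: t) := by
      intro j hj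
      exact hperm.mem_iff.2 (PySem.List.mem_pyRange_one.2 ⟨by omega, by omega⟩)
    have happ : (done ++ [r]) ++ t = done ++ r :: t := by simp
    have hperm' : ((done ++ [r]) ++ t).Perm (PySem.List.pyRange 0 (l1.length : Int)) := by
      rw [happ]; exact hperm
    have hpair' : ((done ++ [r]) ++ t).Pairwise (pvLx l1) := by rw [happ]; exact hpair
    have hdone' : ∃ d'', done ++ [r] = o0 :: d'' := ⟨d' ++ [r], by rw [hd']; rfl⟩
    have hlxr : ∀ x ∈ t, pvLx l1 r x := by
      intro x hx
      exact (List.pairwise_cons.1 ((List.pairwise_append.1 hpair).2.1)).1 x hx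
    by_cases hgpos : pvG l1 r > 0
    · -- A finds index r.toNat in the masked list
      have hidx : PySem.List.index? cur (pvG l1 r) = some r.toNat := by
        apply pvIndex?_eq_some_of cur (pvG l1 r) r.toNat (by omega)
        · have hcr := hcur r.toNat hrlen
          rw [List.getD_eq_getElem cur 0 (by omega)] at hcr
          rw [hcr, if_neg (by rw [hrtn]; exact fun hh => hrdone hh.1), hgr]
        · intro j hjk
          have hjlen : j < l1.length := by omega
          have hjr : (j : Int) < r := by omega
          have hcj := hcur j hjlen
          rw [List.getD_eq_getElem cur 0 (by omega)] at hcj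
          rw [hcj]
          by_cases hcnd : ((j : Int) ∈ done ∧ ((j : Int) = o0 ∨ 0 < pvG l1 (j : Int)))
          · rw [if_pos hcnd]; omega
          · rw [if_neg hcnd, ← hgj j hjlen]
            by_cases hjd : (j : Int) ∈ done
            · have hng : ¬ (0 < pvG l1 (j : Int)) := fun hh => hcnd ⟨hjd, Or.inr hh⟩
              omega
            · have hjt : (j : Int) ∈ r :: t :=
                (List.mem_append.1 (hjmem j hjlen)).resolve_left hjd
              have hjt' : (j : Int) ∈ t := by
                rcases List.mem_cons.1 hjt with h | h
                · omega
                · exact h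
              rcases hlxr _ hjt' with h | h
              · omega
              · omega
      -- unfold one step of each fold
      rw [List.map_cons, List.foldl_cons, List.foldl_cons]
      have hsA : pvStepA (u, v, cur) (pvG l1 r)
          = if (r - 1) ∉ v ∧ (r + 1) ∉ v then
              (u ++ [pvG l1 r], v ++ [r], cur.set r.toNat 0)
            else (u, v, cur.set r.toNat 0) := by
        rw [pvStepA, if_pos hgpos]
        simp only [hidx, hrtn]
      have hrv : r ∉ v := fun hh => hrdone (hvdone r hh)
      have hcontains : ∀ (x : Int) (w : List Int), PySem.Set.contains w x = false ↔ x ∉ w := by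
        intro x w
        simp [PySem.Set.contains]
      have hadd : PySem.Set.add v r = v ++ [r] := by
        simp [PySem.Set.add]
        exact hrv
      have hsB : pvStepB l1 (v, total, v) r
          = if (r - 1) ∉ v ∧ (r + 1) ∉ v then
              (v ++ [r], total + pvG l1 r, v ++ [r])
            else (v, total, v) := by
        rw [pvStepB]
        by_cases hc : (r - 1) ∉ v ∧ (r + 1) ∉ v
        · rw [if_pos ⟨hgpos, (hcontains _ _).2 hc.1, (hcontains _ _).2 hc.2⟩, if_pos hc, hadd]
          rfl
        · rw [if_neg (fun hh => hc ⟨(hcontains _ _).1 hh.2.1, (hcontains _ _).1 hh.2.2⟩),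
            if_neg hc]
      have hcurset : ∀ (j : Nat) (hj : j < l1.length),
          (cur.set r.toNat 0).getD j 0
          = if ((j : Int) ∈ done ++ [r] ∧ ((j : Int) = o0 ∨ 0 < pvG l1 (j : Int))) then 0
            else l1[j] := by
        intro j hj
        rw [List.getD_eq_getElem _ 0 (by rw [List.length_set, hlen]; omega), List.getElem_set]
        by_cases hjr : r.toNat = j
        · rw [if_pos hjr,
            if_pos ⟨List.mem_append_right _ (by simp [← hjr, hrtn]),
              Or.inr (by rw [← hjr, hrtn]; exact hgpos)⟩]
        · rw [if_neg hjr]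
          have hcj := hcur j hj
          rw [List.getD_eq_getElem cur 0 (by omega)] at hcj
          rw [hcj]
          have hjrI : (j : Int) ≠ r := fun h => hjr (by omega)
          have hmem : (j : Int) ∈ done ++ [r] ↔ (j : Int) ∈ done := by simp [hjrI]
          by_cases hcnd : ((j : Int) ∈ done ∧ ((j : Int) = o0 ∨ 0 < pvG l1 (j : Int)))
          · rw [if_pos hcnd, if_pos ⟨List.mem_append_left _ hcnd.1, hcnd.2⟩]
          · rw [if_neg hcnd, if_neg (fun hh => hcnd ⟨hmem.1 hh.1, hh.2⟩)]
      rw [hsA, hsB]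
      by_cases hc : (r - 1) ∉ v ∧ (r + 1) ∉ v
      · rw [if_pos hc, if_pos hc]
        exact ih (done ++ [r]) (u ++ [pvG l1 r]) (v ++ [r]) (cur.set r.toNat 0)
          (total + pvG l1 r) hperm' hpair' hdone' (by simp [hsum])
          (fun x hx => by
            rcases List.mem_append.1 hx with h | h
            · exact List.mem_append_left _ (hvdone x h)
            · exact List.mem_append_right _ h)
          (by simp [hlen]) hcurset
      · rw [if_neg hc, if_neg hc]
        exact ih (done ++ [r]) u v (cur.set r.toNat 0) total hperm' hpair' hdone' hsum
          (fun x hx => List.mem_append_left _ (hvdone x hx)) (by simp [hlen]) hcurset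
    · -- value not positive: both sides skip
      rw [List.map_cons, List.foldl_cons, List.foldl_cons]
      have hsA : pvStepA (u, v, cur) (pvG l1 r) = (u, v, cur) := by
        rw [pvStepA, if_neg hgpos]
      have hsB : pvStepB l1 (v, total, v) r = (v, total, v) := by
        rw [pvStepB, if_neg (fun hh => hgpos hh.1)]
      rw [hsA, hsB]
      apply ih (done ++ [r]) u v cur total hperm' hpair' hdone' hsum
        (fun x hx => List.mem_append_left _ (hvdone x hx)) hlen
      intro j hj
      rw [hcur j hj]
      by_cases hjr : (j : Int) = r
      · rw [if_neg (fun hh => hrdone (hjr ▸ hh.1)),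
          if_neg (fun hh => by
            rcases hh.2 with h | h
            · exact hro0 (hjr ▸ h)
            · exact hgpos (hjr ▸ h))]
      · have hmem : (j : Int) ∈ done ++ [r] ↔ (j : Int) ∈ done := by
          simp [hjr]
        by_cases hcnd : ((j : Int) ∈ done ∧ ((j : Int) = o0 ∨ 0 < pvG l1 (j : Int)))
        · rw [if_pos hcnd, if_pos ⟨List.mem_append_left _ hcnd.1, hcnd.2⟩]
        · rw [if_neg hcnd, if_neg (fun hh => hcnd ⟨hmem.1 hh.1, hh.2⟩)]

-- ===== VERDICT (by name: the statement is the Claim_ definition above) =====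
theorem jio1_spec : Claim_equal_jio1 := by
  unfold Claim_equal_jio1
  intro l1 _ hpre
  unfold Spec_jio1
  have hlen0 : 0 < l1.length := List.length_pos_iff.2 hpre
  -- characterise the index order both programs realise
  have hordperm : (PySem.List.sorted (PySem.List.pyRange 0 (l1.length : Int))
      (fun i => -(PySem.List.pyGetD l1 i 0))).Perm (PySem.List.pyRange 0 (l1.length : Int)) :=
    PySem.List.sorted_perm _ _ _
  have hordlex := pvSorted_pairwise_lex (PySem.List.pyRange 0 (l1.length : Int))
      (fun i => -(PySem.List.pyGetD l1 i 0)) (PySem.List.pairwise_lt_pyRange_one _ _)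
  have hordpair : (PySem.List.sorted (PySem.List.pyRange 0 (l1.length : Int))
      (fun i => -(PySem.List.pyGetD l1 i 0))).Pairwise (pvLx l1) := by
    refine hordlex.imp ?_
    intro a b h
    simp only at h
    rcases h with h | h
    · exact Or.inl (by simp only [pvG]; omega)
    · exact Or.inr ⟨by have := h.1; simp only [pvG]; omega, h.2⟩
  obtain ⟨o0, tl, hord⟩ : ∃ o0 tl, PySem.List.sorted (PySem.List.pyRange 0 (l1.length : Int))
      (fun i => -(PySem.List.pyGetD l1 i 0)) = o0 :: tl := by
    cases hs : PySem.List.sorted (PySem.List.pyRange 0 (l1.length : Int))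
        (fun i => -(PySem.List.pyGetD l1 i 0)) with
    | nil =>
      exfalso
      have := (hs ▸ hordperm).length_eq
      simp at this
      omega
    | cons a b => exact ⟨a, b, rfl⟩
  rw [hord] at hordperm hordpair
  have hpair0 : ∀ x ∈ tl, pvLx l1 o0 x := (List.pairwise_cons.1 hordpair).1
  have ho0mem : o0 ∈ PySem.List.pyRange 0 (l1.length : Int) :=
    hordperm.subset List.mem_cons_self
  have ho0r : 0 ≤ o0 ∧ o0 < (l1.length : Int) := PySem.List.mem_pyRange_one.1 ho0mem
  have ho0tn : ((o0.toNat : Int)) = o0 := Int.toNat_of_nonneg ho0r.1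
  have ho0len : o0.toNat < l1.length := by omega
  have hndord : (o0 :: tl).Nodup := hordperm.symm.nodup (PySem.List.nodup_pyRange_one _ _)
  have hgj : ∀ (j : Nat) (hj : j < l1.length), pvG l1 (j : Int) = l1[j] := by
    intro j hj
    simpa [pvG] using PySem.List.pyGetD_eq_getElem l1 (i := (j : Int)) 0 (by omega) (by omega)
  have hg0 : pvG l1 o0 = l1[o0.toNat] := by
    simpa [pvG, ho0tn] using PySem.List.pyGetD_eq_getElem l1 (i := o0) 0 ho0r.1 ho0r.2
  -- B's first iteration picks o0, then its loop equals the abstract fold over tl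
  have hB : jio1_alt l1
      = ((tl.foldl (pvStepB l1) ([o0], 0 + pvG l1 o0, [o0])).2.1,
         (tl.foldl (pvStepB l1) ([o0], 0 + pvG l1 o0, [o0])).2.2) := by
    obtain ⟨m, hm⟩ : ∃ m, l1.length = m + 1 := ⟨l1.length - 1, by omega⟩
    obtain ⟨r0, rs, hR⟩ : ∃ r0 rs, PySem.List.pyRange 0 (l1.length : Int) = r0 :: rs := by
      cases hs : PySem.List.pyRange 0 (l1.length : Int) with
      | nil =>
        exfalso
        have := (hs ▸ hordperm).length_eq
        simp at this
      | cons a b => exact ⟨a, b, rfl⟩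
    have hrangeperm : (r0 :: rs).Perm (o0 :: tl) := hR ▸ hordperm.symm
    have hbi := pvArgmin_eq_head l1 r0 rs o0 tl hrangeperm hordpair
    obtain ⟨hremEq, hperm'⟩ := pvRemove_perm r0 o0 rs tl hrangeperm
    have hlen' : ((r0 :: rs).erase o0).length ≤ m := by
      have h1 := hperm'.length_eq
      have h2 := hrangeperm.length_eq
      have h3 : (r0 :: rs).length = l1.length := by
        rw [← hR, PySem.List.length_pyRange_one]
        omega
      simp only [List.length_cons] at *
      omega
    have hp : (r0 :: rs).foldl (fun (p : Int × Int) i =>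
        let w := PySem.List.pyGetD l1 i 0
        if w > p.2 ∨ (w = p.2 ∧ i < p.1) then (i, w) else p) (r0, PySem.List.pyGetD l1 r0 0)
        = (o0, PySem.List.pyGetD l1 o0 0) := by
      rw [pvPairFold_first, pvPairFold, hbi]
    unfold jio1_alt
    rw [hR, hm]
    show (let p := (r0 :: rs).foldl (fun (p : Int × Int) i =>
        let w := PySem.List.pyGetD l1 i 0
        if w > p.2 ∨ (w = p.2 ∧ i < p.1) then (i, w) else p) (r0, PySem.List.pyGetD l1 r0 0)
      let rem' := (PySem.List.remove? (r0 :: rs) p.1).getD []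
      if (true : Bool) then
        pvSelLoop l1 m rem' false
          (PySem.Set.add (PySem.Set.empty) p.1, 0 + p.2, ([] : List Int) ++ [p.1])
      else if p.2 ≤ 0 then ((0 : Int), ([] : List Int))
      else if PySem.Set.contains (PySem.Set.empty : PySem.Set Int) (p.1 - 1) || PySem.Set.contains (PySem.Set.empty : PySem.Set Int) (p.1 + 1) then
        pvSelLoop l1 m rem' false (PySem.Set.empty, 0, [])
      else
        pvSelLoop l1 m rem' false
          (PySem.Set.add (PySem.Set.empty) p.1, 0 + p.2, ([] : List Int) ++ [p.1]))
      = _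
    simp only [hp, hremEq, if_true]
    have hstart : (PySem.Set.add (PySem.Set.empty) o0, 0 + PySem.List.pyGetD l1 o0 0, ([] : List Int) ++ [o0])
        = (([o0] : List Int), 0 + pvG l1 o0, ([o0] : List Int)) := rfl
    rw [hstart]
    exact pvSelLoop_false_eq l1 m tl _ ([o0], 0 + pvG l1 o0, [o0]) hlen' hperm'
      (List.pairwise_cons.1 hordpair).2 (List.nodup_cons.1 hndord).2
  rw [hB]
  -- A's side: the sorted value list is the image of the index order
  have hmap : List.map (pvG l1) (PySem.List.pyRange 0 (l1.length : Int)) = l1 :=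
    PySem.List.map_pyGetD_pyRange_zero' l1 0
  have hrevpair : ((PySem.List.sorted l1 (fun x => x)).reverse).Pairwise
      (fun a b : Int => b ≤ a) :=
    List.pairwise_reverse.2 (PySem.List.sorted_pairwise l1 (fun x => x))
  have hmappair : (List.map (pvG l1) (o0 :: tl)).Pairwise (fun a b : Int => b ≤ a) := by
    refine List.pairwise_map.2 (hordpair.imp ?_)
    intro a b h
    rcases h with h | h
    · exact le_of_lt h
    · exact le_of_eq h.1.symm
  have hkperm : ((PySem.List.sorted l1 (fun x => x)).reverse).Perm
      (List.map (pvG l1) (o0 :: tl)) := by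
    refine ((List.reverse_perm _).trans (PySem.List.sorted_perm _ _ _)).trans ?_
    exact (hmap ▸ (hordperm.map (pvG l1))).symm
  have hk : (PySem.List.sorted l1 (fun x => x)).reverse = List.map (pvG l1) (o0 :: tl) :=
    List.Perm.eq_of_pairwise (fun a b _ _ h1 h2 => le_antisymm h2 h1) hrevpair hmappair hkperm
  -- A's first index lookup finds o0
  have ho0idx : PySem.List.index? l1 (pvG l1 o0) = some o0.toNat := by
    apply pvIndex?_eq_some_of l1 _ o0.toNat ho0len hg0.symm
    intro j hjk
    have hjlen : j < l1.length := by omega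
    have hjmem : (j : Int) ∈ o0 :: tl :=
      hordperm.mem_iff.2 (PySem.List.mem_pyRange_one.2 ⟨by omega, by omega⟩)
    have hjo0 : (j : Int) ≠ o0 := by omega
    have hjtl : (j : Int) ∈ tl := by
      rcases List.mem_cons.1 hjmem with h | h
      · exact absurd h hjo0
      · exact h
    rw [← hgj j hjlen]
    rcases hpair0 _ hjtl with h | h
    · omega
    · omega
  simp only [jio1, PySem.List.slice?_none_none_neg_one, Option.getD_some, hk]
  rw [List.map_cons]
  simp only [PySem.List.pyGet?_zero_cons, ho0idx]
  have hlam : (fun (st : List Int × List Int × List Int) (i : Int) =>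
      if PySem.List.pyGetD (pvG l1 o0 :: List.map (pvG l1) tl) i 0 > 0 then
        match PySem.List.index? st.2.2 (PySem.List.pyGetD (pvG l1 o0 :: List.map (pvG l1) tl) i 0) with
        | none => st
        | some b =>
          if (b : Int) - 1 ∉ st.2.1 ∧ (b : Int) + 1 ∉ st.2.1 then
            (st.1 ++ [PySem.List.pyGetD (pvG l1 o0 :: List.map (pvG l1) tl) i 0],
              st.2.1 ++ [(b : Int)], st.2.2.set b 0)
          else (st.1, st.2.1, st.2.2.set b 0)
      else st)
      = fun st i => pvStepA st (PySem.List.pyGetD (pvG l1 o0 :: List.map (pvG l1) tl) i 0) := rfl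
  rw [hlam,
    PySem.List.foldl_pyRange_pyGetD' (pvG l1 o0 :: List.map (pvG l1) tl) 0 pvStepA _ (by norm_num)]
  have hdrop : List.drop (1 : Int).toNat (pvG l1 o0 :: List.map (pvG l1) tl)
      = List.map (pvG l1) tl := by simp
  rw [hdrop]
  have hcur0 : ∀ (j : Nat) (hj : j < l1.length),
      (l1.set o0.toNat 0).getD j 0
      = if ((j : Int) ∈ [o0] ∧ ((j : Int) = o0 ∨ 0 < pvG l1 (j : Int))) then 0 else l1[j] := by
    intro j hj
    rw [List.getD_eq_getElem _ 0 (by rw [List.length_set]; omega), List.getElem_set]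
    by_cases hj0 : o0.toNat = j
    · rw [if_pos hj0, if_pos ⟨by simp [← hj0, ho0tn], Or.inl (by rw [← hj0, ho0tn])⟩]
    · rw [if_neg hj0, if_neg (fun hh => hj0 (by
        have h1 := hh.1
        simp only [List.mem_singleton] at h1
        omega))]
  rw [ho0tn]
  exact pvLoopEq l1 o0 tl [o0] [pvG l1 o0] [o0] (l1.set o0.toNat 0) (0 + pvG l1 o0)
    hordperm hordpair ⟨[], rfl⟩ (by simp) (fun x hx => hx) (by simp) hcur0
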